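-- pv_equiv track=rewrite | github.com/tom-haug/aoc-2022 | src/days/day17/b.py | extrapolate_height
-- ===== SOURCE A (Python) =====
-- def extrapolate_height(
--     history: list[int], cycle_interval: int, target_cycle_num: int
-- ) -> int:
--     current_height = history[-1]
--     cur_cycle_num = len(history)
--     cycle_height_diff = current_height - history[-1 * cycle_interval - 1]
--     num_intervals = (target_cycle_num - cur_cycle_num) // cycle_interval
--     full_interval_height = num_intervals * cycle_height_diff
--     remainder_rock_count = (target_cycle_num - cur_cycle_num) % cycle_interval
--
--     target_height = current_height + full_interval_height + 1
--     for idx in range(remainder_rock_count):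
--         target_height += (
--             history[-1 * (cycle_interval - idx)]
--             - history[-1 * (cycle_interval - idx + 1)]
--         )
--     return target_height
-- ===== SOURCE B (Python) =====
-- def extrapolate_height(
--     history: list[int], cycle_interval: int, target_cycle_num: int
-- ) -> int:
--     # The remainder loop is a telescoping sum, so it collapses to a single
--     # difference of two history entries.
--     n = len(history)
--     diff = history[-1] - history[-cycle_interval - 1]
--     q, r = divmod(target_cycle_num - n, cycle_interval)
--     base = history[-1] + q * diff + 1
--     if r > 0:
--         return base + history[r - 1 - cycle_interval] - history[-cycle_interval - 1]
--     return base
-- ===== Notes on version B (the rewrite author's own statement) =====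
-- stated objective: alternative
-- what changed: The per-remainder loop of adjacent history differences is replaced by its telescoped closed form, a single difference of two history entries, so the loop disappears entirely.
import Mathlib
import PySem

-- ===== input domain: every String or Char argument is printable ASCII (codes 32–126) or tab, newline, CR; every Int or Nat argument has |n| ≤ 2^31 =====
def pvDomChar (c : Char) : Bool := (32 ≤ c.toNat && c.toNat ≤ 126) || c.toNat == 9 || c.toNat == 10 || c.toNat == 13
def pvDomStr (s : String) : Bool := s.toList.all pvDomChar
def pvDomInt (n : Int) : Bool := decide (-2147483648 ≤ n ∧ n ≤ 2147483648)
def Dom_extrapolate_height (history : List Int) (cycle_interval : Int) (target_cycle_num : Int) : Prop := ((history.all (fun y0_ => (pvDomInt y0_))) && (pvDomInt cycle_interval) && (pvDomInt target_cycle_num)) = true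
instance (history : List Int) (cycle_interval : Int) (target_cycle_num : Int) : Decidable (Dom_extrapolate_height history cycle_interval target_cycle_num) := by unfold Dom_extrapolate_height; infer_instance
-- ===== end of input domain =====

-- B replaces A's per-remainder loop by its telescoped closed form (one difference of two history entries).

-- ===== PORT A =====
def extrapolate_height (history : List Int) (cycle_interval : Int) (target_cycle_num : Int) : Int :=
  let current_height := PySem.List.pyGetD history (-1) 0
  let cur_cycle_num : Int := history.length
  let cycle_height_diff := current_height - PySem.List.pyGetD history (-1 * cycle_interval - 1) 0
  let num_intervals := PySem.Int.floordiv (target_cycle_num - cur_cycle_num) cycle_interval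
  let full_interval_height := num_intervals * cycle_height_diff
  let remainder_rock_count := PySem.Int.mod (target_cycle_num - cur_cycle_num) cycle_interval
  (PySem.List.pyRange 0 remainder_rock_count 1).foldl
    (fun target_height idx =>
      target_height +
        (PySem.List.pyGetD history (-1 * (cycle_interval - idx)) 0
          - PySem.List.pyGetD history (-1 * (cycle_interval - idx + 1)) 0))
    (current_height + full_interval_height + 1)

-- ===== PORT B =====
def extrapolate_height_alt (history : List Int) (cycle_interval : Int) (target_cycle_num : Int) : Int :=
  let n : Int := history.length
  let diff := PySem.List.pyGetD history (-1) 0 - PySem.List.pyGetD history (-cycle_interval - 1) 0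
  let q := PySem.Int.floordiv (target_cycle_num - n) cycle_interval
  let r := PySem.Int.mod (target_cycle_num - n) cycle_interval
  let base := PySem.List.pyGetD history (-1) 0 + q * diff + 1
  if 0 < r then
    base + PySem.List.pyGetD history (r - 1 - cycle_interval) 0
      - PySem.List.pyGetD history (-cycle_interval - 1) 0
  else base

-- ===== PRECONDITION & SPEC =====
-- Pre_: exactly the inputs on which A returns (no exception): a non-empty history,
-- a non-zero cycle_interval, and history[-cycle_interval - 1] in range.
def Pre_extrapolate_height (history : List Int) (cycle_interval : Int) (target_cycle_num : Int) : Prop :=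
  history ≠ [] ∧ cycle_interval ≠ 0 ∧
    cycle_interval < (history.length : Int) ∧ -(history.length : Int) ≤ cycle_interval
instance (history : List Int) (cycle_interval : Int) (target_cycle_num : Int) : Decidable (Pre_extrapolate_height history cycle_interval target_cycle_num) := by unfold Pre_extrapolate_height; infer_instance
def pvWitness_extrapolate_height : List Int × Int × Int := ([1, 3, 4, 8], 3, 20)

def Spec_extrapolate_height (history : List Int) (cycle_interval : Int) (target_cycle_num : Int) (out : Int) : Prop := out = extrapolate_height_alt history cycle_interval target_cycle_num
instance (history : List Int) (cycle_interval : Int) (target_cycle_num : Int) (out : Int) : Decidable (Spec_extrapolate_height history cycle_interval target_cycle_num out) := by unfold Spec_extrapolate_height; infer_instance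

-- ===== CLAIM (what is proved, stated in full; the proofs are below) =====
def Claim_equal_extrapolate_height : Prop := ∀ (history : List Int) (cycle_interval : Int) (target_cycle_num : Int), Dom_extrapolate_height history cycle_interval target_cycle_num → Pre_extrapolate_height history cycle_interval target_cycle_num → Spec_extrapolate_height history cycle_interval target_cycle_num (extrapolate_height history cycle_interval target_cycle_num)

-- ===== LEMMAS AND PROOFS =====

-- Telescoping: A's loop over range(r) collapses to one difference (pure arithmetic,
-- no side condition needed since both sides read the same total pyGetD values).
theorem pv_telescope (history : List Int) (ci init : Int) (r : Nat) :
    (PySem.List.pyRange 0 (r : Int) 1).foldl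
      (fun th idx =>
        th + (PySem.List.pyGetD history (-1 * (ci - idx)) 0
          - PySem.List.pyGetD history (-1 * (ci - idx + 1)) 0)) init
    = if 0 < r then
        init + PySem.List.pyGetD history ((r : Int) - 1 - ci) 0
          - PySem.List.pyGetD history (-ci - 1) 0
      else init := by
  induction r with
  | zero => simp [PySem.List.pyRange]
  | succ k ih =>
    push_cast
    rw [PySem.List.pyRange_one_succ_right (by positivity)]
    rw [List.foldl_append]
    simp only [List.foldl_cons, List.foldl_nil]
    rw [ih]
    rw [if_pos (Nat.succ_pos k)]
    by_cases hk : 0 < k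
    · rw [if_pos hk]
      have h1 : -1 * (ci - (k : Int)) = ((k : Int) + 1 - 1 - ci) := by ring
      have h2 : -1 * (ci - (k : Int) + 1) = ((k : Int) - 1 - ci) := by ring
      rw [h1, h2]; ring
    · have hk0 : k = 0 := by omega
      subst hk0
      rw [if_neg (by omega)]
      have h1 : -1 * (ci - ((0:Nat) : Int)) = (((0:Nat) : Int) + 1 - 1 - ci) := by ring
      have h2 : -1 * (ci - ((0:Nat) : Int) + 1) = (-ci - 1) := by ring
      rw [h1, h2]; ring

theorem pv_pyRange_nonpos (r : Int) (hr : r ≤ 0) : PySem.List.pyRange 0 r 1 = [] := by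
  simp [PySem.List.pyRange]
  omega

-- ===== VERDICT (by name: the statement is the Claim_ definition above) =====
theorem extrapolate_height_spec : Claim_equal_extrapolate_height := by
  intro history ci t _ hpre
  obtain ⟨hne, hci, hlt, hge⟩ := hpre
  unfold Spec_extrapolate_height extrapolate_height extrapolate_height_alt
  simp only []
  set r := PySem.Int.mod (t - (history.length : Int)) ci with hr
  by_cases hpos : 0 < r
  · have hrpos : r = ((r.toNat : Nat) : Int) := by omega
    rw [hrpos, pv_telescope]
    have h2 : 0 < r.toNat := by omega
    rw [if_pos h2, if_pos (show (0:Int) < ((r.toNat : Nat) : Int) by omega)]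
    have h1 : -1 * ci - 1 = -ci - 1 := by ring
    rw [h1, ← hrpos]
  · rw [pv_pyRange_nonpos r (by omega)]
    simp only [List.foldl_nil, hpos, if_neg, not_false_iff]
    have h1 : -1 * ci - 1 = -ci - 1 := by ring
    rw [h1]
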